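-- pv_equiv track=rewrite | github.com/karlosia/pp1 | 04-Subroutines/04subroutines/zad36.py | f
-- ===== SOURCE A (Python) =====
-- def f(detector):
--     count=0
--     max_people=0
--
--     for event in detector:
--         if event=='+':
--             count=count+1
--             max_people=max_people+count
--         elif event=='-':
--             count=count-1
--
--     return max_people>=3
-- ===== SOURCE B (Python) =====
-- def f(detector):
--     deltas = [1 if e == '+' else (-1 if e == '-' else 0) for e in detector]
--     prefixes = []
--     total = 0
--     for d in deltas:
--         total += d
--         prefixes.append(total)
--     return sum(p for e, p in zip(detector, prefixes) if e == '+') >= 3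
-- ===== Notes on version B (the rewrite author's own statement) =====
-- stated objective: alternative
-- what changed: Replaces A's single fused two-accumulator loop with a prefix-table construction (map events to deltas, accumulate running counts) followed by a separate selective summation of the prefix values at '+' events.
import Mathlib
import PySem

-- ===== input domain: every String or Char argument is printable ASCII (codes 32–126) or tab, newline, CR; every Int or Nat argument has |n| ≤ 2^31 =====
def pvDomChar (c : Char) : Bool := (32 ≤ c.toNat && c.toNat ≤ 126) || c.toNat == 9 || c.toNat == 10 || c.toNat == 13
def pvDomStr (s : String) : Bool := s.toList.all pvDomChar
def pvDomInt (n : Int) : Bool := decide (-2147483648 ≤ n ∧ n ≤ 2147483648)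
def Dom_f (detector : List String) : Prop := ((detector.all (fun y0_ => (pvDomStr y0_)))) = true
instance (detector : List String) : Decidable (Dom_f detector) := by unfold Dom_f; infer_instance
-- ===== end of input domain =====

-- B replaces A's fused two-accumulator loop by a prefix-count table plus a selective sum; alternative decomposition, same cost.

-- ===== PORT A =====
def f (detector : List String) : Bool :=
  let st := detector.foldl
    (fun (s : Int × Int) event =>
      if event = "+" then (s.1 + 1, s.2 + (s.1 + 1))
      else if event = "-" then (s.1 - 1, s.2)
      else s)
    (0, 0)
  decide (st.2 ≥ 3)

-- ===== PORT B =====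
def f_alt (detector : List String) : Bool :=
  let deltas := detector.map (fun e => if e = "+" then (1 : Int) else if e = "-" then (-1 : Int) else 0)
  let st := deltas.foldl (fun (s : Int × List Int) d => (s.1 + d, s.2 ++ [s.1 + d])) (0, [])
  let total := ((detector.zip st.2).filter (fun p => p.1 = "+")).foldl (fun acc p => acc + p.2) (0 : Int)
  decide (total ≥ 3)

-- ===== PRECONDITION & SPEC =====
def Spec_f (detector : List String) (out : Bool) : Prop := out = f_alt detector
instance (detector : List String) (out : Bool) : Decidable (Spec_f detector out) := by unfold Spec_f; infer_instance

-- ===== CLAIM (what is proved, stated in full; the proofs are below) =====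
def Claim_equal_f : Prop := ∀ (detector : List String), Dom_f detector → Spec_f detector (f detector)

-- ===== LEMMAS AND PROOFS =====

-- recursive characterisation of the prefix table starting from running total t
def pvPrefixes (ds : List Int) (t : Int) : List Int :=
  match ds with
  | [] => []
  | d :: ds => (t + d) :: pvPrefixes ds (t + d)

theorem pvPrefixes_foldl (ds : List Int) (t : Int) (acc : List Int) :
    ds.foldl (fun (s : Int × List Int) d => (s.1 + d, s.2 ++ [s.1 + d])) (t, acc)
      = (t + ds.sum, acc ++ pvPrefixes ds t) := by
  induction ds generalizing t acc with
  | nil => simp [pvPrefixes]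
  | cons d ds ih =>
      simp only [List.foldl_cons, pvPrefixes, ih, List.sum_cons, List.append_assoc,
        List.singleton_append, add_assoc]

theorem pvFoldlAdd (l : List (String × Int)) (a : Int) :
    l.foldl (fun acc p => acc + p.2) a = a + l.foldl (fun acc p => acc + p.2) 0 := by
  induction l generalizing a with
  | nil => simp
  | cons x xs ih =>
      simp only [List.foldl_cons]
      rw [ih (a + x.2), ih (0 + x.2)]
      ring

-- recursive form of the selective sum
def pvSelR (es : List String) (ps : List Int) : Int :=
  match es, ps with
  | e :: es, p :: ps => (if e = "+" then p else 0) + pvSelR es ps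
  | _, _ => 0

theorem pvSelR_eq (es : List String) (ps : List Int) :
    ((es.zip ps).filter (fun p => p.1 = "+")).foldl (fun acc p => acc + p.2) (0 : Int)
      = pvSelR es ps := by
  induction es generalizing ps with
  | nil => simp [pvSelR]
  | cons e es ih =>
      cases ps with
      | nil => simp [pvSelR]
      | cons p ps =>
          simp only [List.zip_cons_cons, List.filter_cons, pvSelR]
          by_cases h : e = "+"
          · subst h
            simp only [decide_true, if_true, List.foldl_cons]
            rw [pvFoldlAdd, ih]
            simp
          · simp [h, ih]

def pvDelta (e : String) : Int := if e = "+" then 1 else if e = "-" then -1 else 0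

theorem pvMain (es : List String) (t s : Int) :
    (es.foldl
      (fun (st : Int × Int) event =>
        if event = "+" then (st.1 + 1, st.2 + (st.1 + 1))
        else if event = "-" then (st.1 - 1, st.2)
        else st)
      (t, s)).2 = s + pvSelR es (pvPrefixes (es.map pvDelta) t) := by
  induction es generalizing t s with
  | nil => simp [pvSelR]
  | cons e es ih =>
      simp only [List.foldl_cons, List.map_cons, pvPrefixes, pvSelR, pvDelta]
      by_cases h : e = "+"
      · subst h
        simp [ih]
        ring
      · by_cases h2 : e = "-"
        · subst h2
          simp only [ih, (by decide : (("-" : String) = "+") = False), if_false, if_true]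
          rw [show t + -1 = t - 1 from by ring]
          ring
        · simp [h, h2, ih]

-- ===== VERDICT (by name: the statement is the Claim_ definition above) =====
theorem f_spec : Claim_equal_f := by
  intro detector _
  unfold Spec_f f f_alt
  simp only [pvPrefixes_foldl, List.nil_append, pvSelR_eq]
  have h : (detector.map (fun e => if e = "+" then (1 : Int) else if e = "-" then (-1 : Int) else 0))
      = detector.map pvDelta := rfl
  rw [h, pvMain]
  simp
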